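-- pv_equiv track=rewrite | github.com/luohaha66/MyCode | python/leetCode/#29_divide_two_int.py | version3
-- ===== SOURCE A (Python) =====
-- def version3(dividend: int, divisor: int) -> int:
--     sign = (dividend > 0) ^ (divisor > 0)
--     dividend = abs(dividend)
--     divisor = abs(divisor)
--     count = 0
--     # 把除数不断左移，直到它大于被除数
--     while dividend >= divisor:
--         count += 1
--         divisor <<= 1
--     result = 0
--     while count > 0:
--         count -= 1
--         divisor >>= 1
--         if divisor <= dividend:
--             result += 1 << count  # 这里的移位运算是把二进制（第count+1位上的1）转换为十进制
--             dividend -= divisor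
--     if sign:
--         result = -result
--     return result if -(1<<31) <= result <= (1<<31)-1 else (1<<31)-1
-- ===== SOURCE B (Python) =====
-- def version3(dividend: int, divisor: int) -> int:
--     sign = (dividend > 0) ^ (divisor > 0)
--     dividend, divisor = abs(dividend), abs(divisor)
--     result = 0
--     while dividend >= divisor:
--         temp, multiple = divisor, 1
--         while dividend >= (temp << 1):
--             temp <<= 1
--             multiple <<= 1
--         dividend -= temp
--         result += multiple
--     if sign:
--         result = -result
--     return result if -(1 << 31) <= result <= (1 << 31) - 1 else (1 << 31) - 1
-- ===== Notes on version B (the rewrite author's own statement) =====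
-- stated objective: alternative
-- what changed: A makes one global pass shifting the divisor up past the dividend and then a second pass shifting it back down, extracting quotient bits; B instead repeatedly restarts a doubling search (temp, multiple) from the divisor and subtracts the largest reachable multiple, accumulating the quotient directly with no precomputed shift count.
import Mathlib
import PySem

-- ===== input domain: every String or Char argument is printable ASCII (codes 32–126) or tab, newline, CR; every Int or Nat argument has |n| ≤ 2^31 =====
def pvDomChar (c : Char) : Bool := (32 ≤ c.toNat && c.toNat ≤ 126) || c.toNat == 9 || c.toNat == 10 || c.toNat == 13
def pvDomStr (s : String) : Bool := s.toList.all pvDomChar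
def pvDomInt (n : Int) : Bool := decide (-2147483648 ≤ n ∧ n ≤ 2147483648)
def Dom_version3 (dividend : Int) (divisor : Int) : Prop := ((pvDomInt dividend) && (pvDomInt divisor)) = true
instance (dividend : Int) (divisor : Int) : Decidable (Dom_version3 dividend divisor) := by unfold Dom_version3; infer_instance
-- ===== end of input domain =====

-- B replaces A's two global passes (shift the divisor up past the dividend, then shift it back
-- down extracting quotient bits) by the restarted nested-doubling subtraction scheme; same cost
-- class, different loop structure (objective: alternative).
-- Both loops are ported with a `fuel` argument that is exactly the loop's decreasing measure —
-- a totality guard only, proved never to run out on the admitted inputs (divisor ≠ 0, see Pre_).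

-- ===== PORT A =====
-- first while loop: `while dividend >= divisor: count += 1; divisor <<= 1`
-- (count, an int that only counts iterations, is tracked as a Nat)
def v3loop1 (fuel : Nat) (dividend divisor : Int) : Nat × Int :=
  match fuel with
  | 0 => (0, divisor)
  | f + 1 =>
    if dividend ≥ divisor then
      let r := v3loop1 f dividend (divisor <<< (1:Nat))
      (r.1 + 1, r.2)
    else (0, divisor)

-- second while loop: `while count > 0: count -= 1; divisor >>= 1; if divisor <= dividend: ...`
def v3loop2 (count : Nat) (divisor dividend result : Int) : Int :=
  match count with
  | 0 => result
  | c + 1 =>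
    let d := divisor >>> (1:Nat)
    if d ≤ dividend then v3loop2 c d (dividend - d) (result + (1:Int) <<< c)
    else v3loop2 c d dividend result

def version3 (dividend : Int) (divisor : Int) : Int :=
  let sign := xor (decide (dividend > 0)) (decide (divisor > 0))
  let a := |dividend|
  let d := |divisor|
  if 0 < d then  -- totality guard only: with divisor = 0 the Python loops forever (see Pre_)
    let r := v3loop1 ((a + 1 - d).toNat) a d
    let result := v3loop2 r.1 r.2 a 0
    let result := if sign then -result else result
    if -((1:Int) <<< 31) ≤ result ∧ result ≤ (1:Int) <<< 31 - 1 then result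
    else (1:Int) <<< 31 - 1
  else 0

-- ===== PORT B =====
-- inner while loop: `while dividend >= (temp << 1): temp <<= 1; multiple <<= 1`
def altInner (fuel : Nat) (dividend temp multiple : Int) : Int × Int :=
  match fuel with
  | 0 => (temp, multiple)
  | f + 1 =>
    if dividend ≥ temp <<< (1:Nat) then
      altInner f dividend (temp <<< (1:Nat)) (multiple <<< (1:Nat))
    else (temp, multiple)

-- outer while loop: `while dividend >= divisor: ... dividend -= temp; result += multiple`
def altOuter (fuel : Nat) (dividend divisor result : Int) : Int :=
  match fuel with
  | 0 => result
  | f + 1 =>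
    if dividend ≥ divisor then
      let tm := altInner ((dividend + 1 - divisor).toNat) dividend divisor 1
      altOuter f (dividend - tm.1) divisor (result + tm.2)
    else result

def version3_alt (dividend : Int) (divisor : Int) : Int :=
  let sign := xor (decide (dividend > 0)) (decide (divisor > 0))
  let a := |dividend|
  let d := |divisor|
  if 0 < d then  -- totality guard only: with divisor = 0 the Python loops forever (see Pre_)
    let result := altOuter a.toNat a d 0
    let result := if sign then -result else result
    if -((1:Int) <<< 31) ≤ result ∧ result ≤ (1:Int) <<< 31 - 1 then result
    else (1:Int) <<< 31 - 1
  else 0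

-- ===== PRECONDITION & SPEC =====
-- Pre_ excludes divisor = 0, on which both Pythons loop forever (A never returns).
def Pre_version3 (dividend : Int) (divisor : Int) : Prop := divisor ≠ 0
instance (dividend : Int) (divisor : Int) : Decidable (Pre_version3 dividend divisor) := by unfold Pre_version3; infer_instance
def pvWitness_version3 : Int × Int := (7, 2)

def Spec_version3 (dividend : Int) (divisor : Int) (out : Int) : Prop := out = version3_alt dividend divisor
instance (dividend : Int) (divisor : Int) (out : Int) : Decidable (Spec_version3 dividend divisor out) := by unfold Spec_version3; infer_instance

-- ===== CLAIM (what is proved, stated in full; the proofs are below) =====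
def Claim_equal_version3 : Prop := ∀ (dividend : Int) (divisor : Int), Dom_version3 dividend divisor → Pre_version3 dividend divisor → Spec_version3 dividend divisor (version3 dividend divisor)

-- ===== LEMMAS AND PROOFS =====

-- A's first loop returns the shift count c and the shifted divisor d * 2^c, with dividend < d * 2^c
theorem v3loop1_spec (fuel : Nat) (a : Int) : ∀ d : Int, 0 < d → (a + 1 - d).toNat ≤ fuel →
    ∃ c : Nat, v3loop1 fuel a d = (c, d * 2 ^ c) ∧ a < d * 2 ^ c := by
  induction fuel with
  | zero =>
    intro d hd hf
    exact ⟨0, by simp [v3loop1], by simp only [pow_zero, mul_one]; omega⟩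
  | succ f ih =>
    intro d hd hf
    by_cases h : a ≥ d
    · have hsl : d <<< (1:Nat) = d * 2 := by simp [Int.shiftLeft_eq]
      obtain ⟨c, hc, hlt⟩ := ih (d <<< (1:Nat)) (by omega) (by rw [hsl]; omega)
      refine ⟨c + 1, ?_, ?_⟩
      · simp only [v3loop1, if_pos h, hc]
        simp only [Prod.mk.injEq]
        refine ⟨by simp, ?_⟩
        rw [hsl]; ring
      · rw [hsl] at hlt
        have e : d * 2 * 2 ^ c = d * 2 ^ (c + 1) := by ring
        rw [e] at hlt
        exact hlt
    · exact ⟨0, by simp [v3loop1, if_neg h], by simp only [pow_zero, mul_one]; omega⟩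

-- A's second loop does binary long division: starting from divisor = d * 2^c with dividend < d * 2^c
theorem v3loop2_spec (c : Nat) (d : Int) (hd : 0 < d) :
    ∀ a r : Int, 0 ≤ a → a < d * 2 ^ c → v3loop2 c (d * 2 ^ c) a r = r + a / d := by
  induction c with
  | zero =>
    intro a r ha hlt
    simp only [pow_zero, mul_one] at hlt
    simp [v3loop2, Int.ediv_eq_zero_of_lt ha hlt]
  | succ c ih =>
    intro a r ha hlt
    have hsh : (d * 2 ^ (c + 1)) >>> (1:Nat) = d * 2 ^ c := by
      have h2 : d * 2 ^ (c + 1) = d * 2 ^ c * 2 := by ring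
      rw [Int.shiftRight_eq_div_pow, h2]
      push_cast
      exact Int.mul_ediv_cancel _ (by norm_num)
    have hpow : (0:Int) < d * 2 ^ c := by positivity
    simp only [v3loop2, hsh]
    split_ifs with hle
    · rw [ih (a - d * 2 ^ c) (r + (1:Int) <<< c) (by omega)
        (by rw [pow_succ] at hlt; nlinarith)]
      have : a = (a - d * 2 ^ c) + 2 ^ c * d := by ring
      rw [this, Int.add_mul_ediv_right _ _ (by omega)]
      simp only [Int.shiftLeft_eq]
      ring_nf
    · rw [ih a r ha (by omega)]

theorem version3_value (a d : Int) (ha : 0 ≤ a) (hd : 0 < d) :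
    v3loop2 (v3loop1 ((a + 1 - d).toNat) a d).1 (v3loop1 ((a + 1 - d).toNat) a d).2 a 0
      = a / d := by
  obtain ⟨c, hc, hlt⟩ := v3loop1_spec ((a + 1 - d).toNat) a d hd le_rfl
  rw [hc]
  exact (v3loop2_spec c d hd a 0 ha hlt).trans (zero_add _)

-- B's inner loop doubles (temp, multiple) in lockstep until the next doubling would overshoot
theorem altInner_spec (fuel : Nat) (a : Int) : ∀ t m : Int, 0 < t → t ≤ a → (a + 1 - t).toNat ≤ fuel →
    ∃ k : Nat, altInner fuel a t m = (t * 2 ^ k, m * 2 ^ k)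
      ∧ t * 2 ^ k ≤ a ∧ a < t * 2 ^ (k + 1) := by
  induction fuel with
  | zero =>
    intro t m ht hta hf
    omega
  | succ f ih =>
    intro t m ht hta hf
    have hsl : t <<< (1:Nat) = t * 2 := by simp [Int.shiftLeft_eq]
    by_cases h : a ≥ t <<< (1:Nat)
    · rw [hsl] at h
      obtain ⟨k, he, h1, h2⟩ := ih (t <<< (1:Nat)) (m <<< (1:Nat)) (by omega) (by omega) (by rw [hsl]; omega)
      rw [hsl] at h1 h2
      have hsm : m <<< (1:Nat) = m * 2 := by simp [Int.shiftLeft_eq]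
      refine ⟨k + 1, ?_, ?_, ?_⟩
      · simp only [altInner, if_pos (by rw [hsl]; omega : a ≥ t <<< (1:Nat))]
        refine he.trans ?_
        simp only [hsl, hsm, Prod.mk.injEq]
        exact ⟨by ring, by ring⟩
      · have e : t * 2 * 2 ^ k = t * 2 ^ (k + 1) := by ring
        linarith [h1, e.le, e.ge]
      · have e : t * 2 * 2 ^ (k + 1) = t * 2 ^ (k + 1 + 1) := by ring
        linarith [h2, e.le, e.ge]
    · rw [hsl] at h
      refine ⟨0, by simp [altInner, if_neg (by rw [hsl]; omega : ¬ a ≥ t <<< (1:Nat))], by simpa using hta, ?_⟩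
      simp only [zero_add, pow_one]
      omega

-- B's outer loop accumulates the quotient: altOuter fuel a d r = r + a / d
theorem altOuter_spec (fuel : Nat) (d : Int) (hd : 0 < d) :
    ∀ a r : Int, 0 ≤ a → a.toNat ≤ fuel → altOuter fuel a d r = r + a / d := by
  induction fuel with
  | zero =>
    intro a r ha hf
    have haz : a = 0 := by omega
    subst haz
    simp [altOuter]
  | succ f ih =>
    intro a r ha hf
    by_cases h : a ≥ d
    · obtain ⟨k, he, h1, h2⟩ := altInner_spec ((a + 1 - d).toNat) a d 1 hd (by omega) le_rfl
      have hpos : (0:Int) < d * 2 ^ k := by positivity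
      simp only [altOuter, if_pos h, he, one_mul]
      rw [ih (a - d * 2 ^ k) (r + 2 ^ k) (by omega) (by omega)]
      have key : (a - d * 2 ^ k + 2 ^ k * d) / d = (a - d * 2 ^ k) / d + 2 ^ k :=
        Int.add_mul_ediv_right _ _ (by omega)
      have hsplit : a - d * 2 ^ k + 2 ^ k * d = a := by ring
      rw [hsplit] at key
      rw [key]
      ring
    · simp only [altOuter, if_neg h]
      rw [Int.ediv_eq_zero_of_lt ha (by omega), add_zero]

-- ===== VERDICT (by name: the statement is the Claim_ definition above) =====
theorem version3_spec : Claim_equal_version3 := by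
  intro dividend divisor _ hpre
  unfold Spec_version3 version3 version3_alt
  have hd : 0 < |divisor| := abs_pos.mpr hpre
  simp only [hd, if_pos]
  rw [version3_value |dividend| |divisor| (abs_nonneg _) hd,
    altOuter_spec (|dividend|).toNat |divisor| hd |dividend| 0 (abs_nonneg _) le_rfl, zero_add]
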